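-- pv_equiv track=rewrite | github.com/ueveys/hizb_program | main.py | calculate_start_points
-- ===== SOURCE A (Python) =====
-- def calculate_start_points(people_names):
--     num_people = len(people_names)
--     num_cuz = 30
--     num_hizb_per_cuz = 4
--     start_points = []
--
--     current_cuz = 1
--     current_hizb = 1
--     for _ in range(num_people):
--         start_points.append((current_cuz, current_hizb))
--         current_hizb += 1
--         if current_hizb > num_hizb_per_cuz:
--             current_hizb = 1
--             current_cuz += 1
--             if current_cuz > num_cuz:
--                 current_cuz = 1
--
--     return start_points
-- ===== SOURCE B (Python) =====
-- def calculate_start_points(people_names):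
--     return [(i // 4 % 30 + 1, i % 4 + 1) for i in range(len(people_names))]
-- ===== Notes on version B (the rewrite author's own statement) =====
-- stated objective: idiomatic
-- what changed: Replaces the stateful counter-with-conditional-resets loop by a closed-form modular formula per index, built as a single list comprehension.
import Mathlib
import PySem

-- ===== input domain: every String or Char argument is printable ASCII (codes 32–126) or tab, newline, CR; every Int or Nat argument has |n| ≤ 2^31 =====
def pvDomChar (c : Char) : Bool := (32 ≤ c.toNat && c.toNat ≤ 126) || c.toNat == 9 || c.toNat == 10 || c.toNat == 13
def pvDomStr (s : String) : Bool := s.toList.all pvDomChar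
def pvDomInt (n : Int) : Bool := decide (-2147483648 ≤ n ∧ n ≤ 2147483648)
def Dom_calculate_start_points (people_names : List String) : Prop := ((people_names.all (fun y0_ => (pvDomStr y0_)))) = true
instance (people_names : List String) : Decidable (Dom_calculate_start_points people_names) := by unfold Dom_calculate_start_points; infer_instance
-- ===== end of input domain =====

-- B replaces A's stateful counters with conditional resets by a closed-form modular formula per index (idiomatic; same cost).

-- ===== PORT A =====
-- the for-loop over range(num_people) with state (current_cuz, current_hizb); appending
-- to start_points becomes consing the current pair onto the rest of the loop's output
def pvLoopA : Nat → Int → Int → List (Int × Int)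
  | 0, _, _ => []
  | n + 1, c, h =>
      (c, h) ::
        (if h + 1 > 4 then
          (if c + 1 > 30 then pvLoopA n 1 1 else pvLoopA n (c + 1) 1)
         else pvLoopA n c (h + 1))

def calculate_start_points (people_names : List String) : List (Int × Int) :=
  pvLoopA people_names.length 1 1

-- ===== PORT B =====
-- i ≥ 0 throughout, so Python's // and % coincide with Nat division/modulus
def calculate_start_points_alt (people_names : List String) : List (Int × Int) :=
  (List.range people_names.length).map
    (fun i => (((i / 4 % 30 + 1 : Nat) : Int), ((i % 4 + 1 : Nat) : Int)))

-- ===== PRECONDITION & SPEC =====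
def Spec_calculate_start_points (people_names : List String) (out : List (Int × Int)) : Prop := out = calculate_start_points_alt people_names
instance (people_names : List String) (out : List (Int × Int)) : Decidable (Spec_calculate_start_points people_names out) := by unfold Spec_calculate_start_points; infer_instance

-- ===== CLAIM (what is proved, stated in full; the proofs are below) =====
def Claim_equal_calculate_start_points : Prop := ∀ (people_names : List String), Dom_calculate_start_points people_names → Spec_calculate_start_points people_names (calculate_start_points people_names)

-- ===== LEMMAS AND PROOFS =====

-- loop invariant: started at the state corresponding to global index k, A's loop
-- emits exactly B's closed-form pairs for indices k, k+1, …, k+n-1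
theorem pvLoopA_eq (n : Nat) : ∀ k : Nat,
    pvLoopA n ((k / 4 % 30 + 1 : Nat) : Int) ((k % 4 + 1 : Nat) : Int) =
      (List.range n).map
        (fun i => ((((k + i) / 4 % 30 + 1 : Nat) : Int), (((k + i) % 4 + 1 : Nat) : Int))) := by
  induction n with
  | zero => intro k; simp [pvLoopA]
  | succ n ih =>
    intro k
    rw [List.range_succ_eq_map, List.map_cons, List.map_map]
    show pvLoopA (n + 1) _ _ = _ :: _
    rw [pvLoopA]
    have htail : ((List.range n).map
        ((fun i => ((((k + i) / 4 % 30 + 1 : Nat) : Int), (((k + i) % 4 + 1 : Nat) : Int))) ∘ Nat.succ)) =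
        (List.range n).map
        (fun i => (((((k + 1) + i) / 4 % 30 + 1 : Nat) : Int), ((((k + 1) + i) % 4 + 1 : Nat) : Int))) := by
      apply List.map_congr_left
      intro a _
      simp only [Function.comp_apply]
      have h1 : k + a.succ = (k + 1) + a := by omega
      rw [h1]
    by_cases h4 : k % 4 = 3
    · have hc : (((k % 4 + 1 : Nat) : Int) + 1 > 4) := by omega
      rw [if_pos hc]
      by_cases h30 : k / 4 % 30 = 29
      · have hcc : (((k / 4 % 30 + 1 : Nat) : Int) + 1 > 30) := by omega
        rw [if_pos hcc]
        have e1 : (1 : Int) = (((k + 1) / 4 % 30 + 1 : Nat) : Int) := by omega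
        have e2 : (1 : Int) = (((k + 1) % 4 + 1 : Nat) : Int) := by omega
        rw [htail, ← ih (k + 1), ← e1, ← e2]
        simp
      · have hcc : ¬ (((k / 4 % 30 + 1 : Nat) : Int) + 1 > 30) := by omega
        rw [if_neg hcc]
        have e1 : ((k / 4 % 30 + 1 : Nat) : Int) + 1 = (((k + 1) / 4 % 30 + 1 : Nat) : Int) := by omega
        have e2 : (1 : Int) = (((k + 1) % 4 + 1 : Nat) : Int) := by omega
        rw [htail, ← ih (k + 1), ← e1, ← e2]
        simp
    · have hc : ¬ (((k % 4 + 1 : Nat) : Int) + 1 > 4) := by omega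
      rw [if_neg hc]
      have e1 : ((k / 4 % 30 + 1 : Nat) : Int) = (((k + 1) / 4 % 30 + 1 : Nat) : Int) := by omega
      have e2 : ((k % 4 + 1 : Nat) : Int) + 1 = (((k + 1) % 4 + 1 : Nat) : Int) := by omega
      rw [htail, ← ih (k + 1), ← e1, ← e2]
      simp

-- ===== VERDICT (by name: the statement is the Claim_ definition above) =====
theorem calculate_start_points_spec : Claim_equal_calculate_start_points := by
  intro ps _
  unfold Spec_calculate_start_points calculate_start_points calculate_start_points_alt
  have h := pvLoopA_eq ps.length 0
  simpa using h
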